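-- pv_equiv track=rewrite | github.com/shyamsaravanan/nexwave | searchprogram.py | dev_id_search
-- ===== SOURCE A (Python) =====
-- def dev_id_search(dev_id,dev_list):
--     if dev_id in dev_list:
--         return 'Dev ID found,Dev ID= '+str(dev_id)+'Index= '+str(dev_list.index(dev_id))
--     elif dev_id>max(dev_list):
--         return 'Not Found'
--     else:
--         for i in dev_list:
--             if i>dev_id:
--                 return 'Value= '+str(i)+'Index= '+str(dev_list.index(i))
-- ===== SOURCE B (Python) =====
-- def dev_id_search(dev_id, dev_list):
--     found = None
--     greater = None
--     for idx, v in enumerate(dev_list):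
--         if found is None and v == dev_id:
--             found = idx
--         if greater is None and v > dev_id:
--             greater = (idx, v)
--     if found is not None:
--         return 'Dev ID found,Dev ID= ' + str(dev_id) + 'Index= ' + str(found)
--     if greater is not None:
--         return 'Value= ' + str(greater[1]) + 'Index= ' + str(greater[0])
--     return 'Not Found'
-- ===== Notes on version B (the rewrite author's own statement) =====
-- stated objective: alternative
-- what changed: A's three separate traversals (membership test, max(), and a for loop whose body re-scans with .index) are replaced by a single enumerate pass recording the first equal index and the first strictly-greater (index, value); the answer is then picked from these records with no further scan.
import Mathlib
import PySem

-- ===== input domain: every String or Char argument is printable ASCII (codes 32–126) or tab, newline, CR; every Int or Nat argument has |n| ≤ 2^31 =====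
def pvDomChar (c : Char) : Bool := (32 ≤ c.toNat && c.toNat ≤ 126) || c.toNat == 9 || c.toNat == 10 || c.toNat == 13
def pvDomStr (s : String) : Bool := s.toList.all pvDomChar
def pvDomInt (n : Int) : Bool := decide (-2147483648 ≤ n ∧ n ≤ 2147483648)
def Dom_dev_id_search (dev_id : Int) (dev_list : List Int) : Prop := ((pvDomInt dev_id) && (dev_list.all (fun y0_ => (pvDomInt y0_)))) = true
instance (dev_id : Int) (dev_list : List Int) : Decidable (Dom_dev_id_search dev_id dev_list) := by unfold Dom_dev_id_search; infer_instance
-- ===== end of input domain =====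

-- B replaces A's separate scans (membership, max(), loop with .index) by one enumerate pass; same results wherever A returns.

-- ===== PORT A =====
-- the 'for i in dev_list' loop of A; 'full' is dev_list (for the .index call)
def devIdLoopA (dev_id : Int) (full : List Int) : List Int → Option String
  | [] => none
  | i :: rest =>
    if i > dev_id then
      match PySem.List.index? full i with
      | some k => some ("Value= " ++ PySem.Int.toStr i ++ "Index= " ++ PySem.Int.toStr (k : Int))
      | none => none
    else devIdLoopA dev_id full rest

def dev_id_search (dev_id : Int) (dev_list : List Int) : Option String :=
  if dev_list.contains dev_id then
    match PySem.List.index? dev_list dev_id with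
    | some k => some ("Dev ID found,Dev ID= " ++ PySem.Int.toStr dev_id ++ "Index= " ++ PySem.Int.toStr (k : Int))
    | none => none
  else
    match PySem.List.max? dev_list (fun x => x) with
    | none => none  -- max([]) raises ValueError; excluded by Pre_
    | some m =>
      if dev_id > m then some "Not Found"
      else devIdLoopA dev_id dev_list dev_list

-- ===== PORT B =====
def dev_id_search_alt (dev_id : Int) (dev_list : List Int) : Option String :=
  let st := (PySem.List.enumerate dev_list).foldl
    (fun (s : Option Int × Option (Int × Int)) p =>
      ((if s.1 = none ∧ p.2 = dev_id then some p.1 else s.1),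
       (if s.2 = none ∧ p.2 > dev_id then some p else s.2)))
    (none, none)
  match st.1 with
  | some k => some ("Dev ID found,Dev ID= " ++ PySem.Int.toStr dev_id ++ "Index= " ++ PySem.Int.toStr k)
  | none =>
    match st.2 with
    | some (k, v) => some ("Value= " ++ PySem.Int.toStr v ++ "Index= " ++ PySem.Int.toStr k)
    | none => some "Not Found"

-- ===== PRECONDITION & SPEC =====
-- Pre_ excludes only the empty list, on which A raises ValueError (max([])).
def Pre_dev_id_search (dev_id : Int) (dev_list : List Int) : Prop := dev_list ≠ []
instance (dev_id : Int) (dev_list : List Int) : Decidable (Pre_dev_id_search dev_id dev_list) := by unfold Pre_dev_id_search; infer_instance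
def pvWitness_dev_id_search : Int × List Int := (2, [1, 3])

def Spec_dev_id_search (dev_id : Int) (dev_list : List Int) (out : Option String) : Prop := out = dev_id_search_alt dev_id dev_list
instance (dev_id : Int) (dev_list : List Int) (out : Option String) : Decidable (Spec_dev_id_search dev_id dev_list out) := by unfold Spec_dev_id_search; infer_instance

-- ===== CLAIM (what is proved, stated in full; the proofs are below) =====
def Claim_equal_dev_id_search : Prop := ∀ (dev_id : Int) (dev_list : List Int), Dom_dev_id_search dev_id dev_list → Pre_dev_id_search dev_id dev_list → Spec_dev_id_search dev_id dev_list (dev_id_search dev_id dev_list)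

-- ===== LEMMAS AND PROOFS =====

-- once an accumulator of the guarded shape is `some`, it stays
theorem pvFoldStay {α β : Type} (c : β → Prop) [DecidablePred c] (g : β → α)
    (l : List β) (a : α) :
    l.foldl (fun (s : Option α) p => if s = none ∧ c p then some (g p) else s) (some a) = some a := by
  induction l with
  | nil => rfl
  | cons x t ih => simp [ih]

-- the first ('found') accumulator computes index?
theorem pvFold1_eq (dev_id : Int) (l : List Int) (s : Int) :
    (PySem.List.enumerate l s).foldl
      (fun (a : Option Int) p => if a = none ∧ p.2 = dev_id then some p.1 else a) none
      = (PySem.List.index? l dev_id).map (fun k => s + (k : Int)) := by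
  induction l generalizing s with
  | nil => simp [PySem.List.enumerate_nil, PySem.List.index?]
  | cons x t ih =>
    rw [PySem.List.enumerate_cons]
    by_cases hx : x = dev_id
    · subst hx
      rw [PySem.List.index?_cons_self]
      simp [pvFoldStay (fun p : Int × Int => p.2 = x) (fun p => p.1)]
    · rw [PySem.List.index?_cons_of_ne t hx]
      simp only [List.foldl_cons, hx, and_false, if_false, ih (s + 1)]
      cases PySem.List.index? t dev_id with
      | none => rfl
      | some k => simp; ring

-- the second ('greater') accumulator is none iff no element exceeds dev_id
theorem pvFold2_none_iff (dev_id : Int) (l : List Int) (s : Int) :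
    ((PySem.List.enumerate l s).foldl
      (fun (a : Option (Int × Int)) p => if a = none ∧ p.2 > dev_id then some p else a) none = none)
      ↔ ∀ x ∈ l, ¬ x > dev_id := by
  induction l generalizing s with
  | nil => simp [PySem.List.enumerate_nil]
  | cons x t ih =>
    rw [PySem.List.enumerate_cons]
    by_cases hx : x > dev_id
    · simp [hx, pvFoldStay (fun p : Int × Int => p.2 > dev_id) (fun p => p)]
    · simp [hx, ih (s + 1)]
      intro _
      omega

-- A's for-loop equals the match on the 'greater' accumulator, for any already-scanned prefix
theorem pvLoopA_eq (dev_id : Int) (pre l : List Int) (hpre : ∀ y ∈ pre, ¬ y > dev_id) :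
    devIdLoopA dev_id (pre ++ l) l =
      match (PySem.List.enumerate l (pre.length : Int)).foldl
        (fun (a : Option (Int × Int)) p => if a = none ∧ p.2 > dev_id then some p else a) none with
      | some (k, v) => some ("Value= " ++ PySem.Int.toStr v ++ "Index= " ++ PySem.Int.toStr k)
      | none => none := by
  induction l generalizing pre with
  | nil => simp [devIdLoopA, PySem.List.enumerate_nil]
  | cons x t ih =>
    rw [PySem.List.enumerate_cons]
    by_cases hx : x > dev_id
    · have hxpre : x ∉ pre := fun hm => hpre x hm hx
      have hidx : PySem.List.index? (pre ++ x :: t) x = some pre.length :=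
        (PySem.List.index?_eq_some_iff (pre ++ x :: t) x pre.length).mpr ⟨pre, t, rfl, rfl, hxpre⟩
      simp only [devIdLoopA, hx, if_true, hidx, List.foldl_cons, and_true]
      simp [pvFoldStay (fun p : Int × Int => p.2 > dev_id) (fun p => p)]
    · have hpre' : ∀ y ∈ pre ++ [x], ¬ y > dev_id := by
        intro y hy
        rcases List.mem_append.mp hy with h | h
        · exact hpre y h
        · simp at h; subst h; exact hx
      have hrec := ih (pre ++ [x]) hpre'
      have hlen : (((pre ++ [x]).length : Nat) : Int) = (pre.length : Int) + 1 := by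
        simp
      rw [hlen] at hrec
      simp only [List.append_assoc, List.singleton_append] at hrec
      simp only [devIdLoopA, hx, if_false, List.foldl_cons, and_false]
      exact hrec

-- ===== VERDICT (by name: the statement is the Claim_ definition above) =====
theorem dev_id_search_spec : Claim_equal_dev_id_search := by
  intro dev_id dev_list _ hpre
  unfold Spec_dev_id_search dev_id_search dev_id_search_alt
  rw [PySem.List.foldl_prod_mk
    (f := fun (a : Option Int) (p : Int × Int) => if a = none ∧ p.2 = dev_id then some p.1 else a)
    (g := fun (a : Option (Int × Int)) (p : Int × Int) => if a = none ∧ p.2 > dev_id then some p else a)]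
  rw [pvFold1_eq dev_id dev_list 0]
  by_cases hmem : dev_id ∈ dev_list
  · obtain ⟨k, hk⟩ := Option.isSome_iff_exists.mp
      ((PySem.List.index?_isSome_iff dev_list dev_id).mpr hmem)
    rw [hk]
    simp [hmem]
  · have hidx : PySem.List.index? dev_list dev_id = none :=
      (PySem.List.index?_eq_none_iff dev_list dev_id).mpr hmem
    obtain ⟨m, hm⟩ : ∃ m, PySem.List.max? dev_list (fun x => x) = some m := by
      cases h : PySem.List.max? dev_list (fun x => x) with
      | none => exact absurd ((PySem.List.max?_eq_none_iff dev_list _).mp h) hpre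
      | some m => exact ⟨m, rfl⟩
    rw [hidx, hm]
    by_cases hgt : dev_id > m
    · have hall : ∀ x ∈ dev_list, ¬ x > dev_id := by
        intro x hx
        have := PySem.List.max?_isMax hm x hx
        simp at this
        omega
      have h2 := (pvFold2_none_iff dev_id dev_list 0).mpr hall
      simp [hmem, hgt, h2]
    · have hm_mem : m ∈ dev_list := PySem.List.max?_mem hm
      have hmgt : m > dev_id := by
        rcases lt_or_eq_of_le (not_lt.mp hgt) with h | h
        · exact h
        · exact absurd (h ▸ hm_mem) hmem
      have h2 : ¬ ((PySem.List.enumerate dev_list (0:Int)).foldl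
          (fun (a : Option (Int × Int)) p => if a = none ∧ p.2 > dev_id then some p else a) none = none) := by
        rw [pvFold2_none_iff]
        intro hall
        exact hall m hm_mem hmgt
      have hA := pvLoopA_eq dev_id [] dev_list (by simp)
      simp only [List.nil_append, List.length_nil, Nat.cast_zero] at hA
      rcases Option.ne_none_iff_exists'.mp h2 with ⟨⟨k, v⟩, hkv⟩
      rw [hkv] at hA
      simp [hmem, hA, hkv, hgt]
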